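-- pv_equiv track=rewrite | github.com/jeomn/Algorithms | programmers/Level2/괄호 변환.py | solution
-- ===== SOURCE A (Python) =====
-- def balanced_string(string):
--     u, v = [], []
--     for i in range(1, len(string)+1):
--         sample = string[:i]
--         if sample.count("(") == sample.count(")"):
--             u = sample
--             v = string[i:]
--             return u, v
--     return u, v
--
-- def check_string(string):
--     check = 0
--     for i in string:
--         if i == "(":
--             check += 1
--         else:
--             check -= 1
--         if check < 0:
--             return False
--
--     return True
--
-- def solution(p):
--     u = []
--     v = []
--
--     if check_string(p):
--         return p
--     u, v = balanced_string(p)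
--
--     if check_string(u):
--         answer = u + solution(v)
--     else:
--         answer = "(" + solution(v) + ")" + u[1:-1].replace("(", "0").replace(")", "(").replace("0", ")")
--
--     return answer
-- ===== SOURCE B (Python) =====
-- def check_string(string):
--     check = 0
--     for ch in string:
--         check += 1 if ch == "(" else -1
--         if check < 0:
--             return False
--     return True
--
-- def balanced_string(string):
--     d = 0
--     for i, ch in enumerate(string, 1):
--         if ch == "(":
--             d += 1
--         elif ch == ")":
--             d -= 1
--         if d == 0:
--             return string[:i], string[i:]
--     return "", ""
--
-- def solution(p):
--     steps = []
--     while not check_string(p):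
--         u, v = balanced_string(p)
--         steps.append((u, check_string(u)))
--         p = v
--     result = p
--     for u, ok in reversed(steps):
--         if ok:
--             result = u + result
--         else:
--             result = "(" + result + ")" + u[1:-1].replace("(", "0").replace(")", "(").replace("0", ")")
--     return result
-- ===== Notes on version B (the rewrite author's own statement) =====
-- stated objective: alternative
-- what changed: Recursion replaced by an explicit loop that collects the (u, check(u)) splits plus a reverse fold assembling the answer innermost-out, and the split search replaced by a single running-difference pass instead of re-counting '(' and ')' in every prefix.
-- outside the precondition, e.g. on solution(')'): A returns [], B returns ''
import Mathlib
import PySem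

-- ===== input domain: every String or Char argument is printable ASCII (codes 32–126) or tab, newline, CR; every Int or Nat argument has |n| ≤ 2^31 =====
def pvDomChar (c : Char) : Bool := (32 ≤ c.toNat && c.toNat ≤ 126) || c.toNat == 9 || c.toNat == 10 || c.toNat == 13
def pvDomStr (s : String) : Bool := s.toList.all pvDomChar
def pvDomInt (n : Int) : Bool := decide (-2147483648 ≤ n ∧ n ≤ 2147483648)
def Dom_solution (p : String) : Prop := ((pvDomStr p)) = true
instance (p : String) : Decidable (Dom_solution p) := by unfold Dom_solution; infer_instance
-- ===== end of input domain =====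

-- B replaces A's recursion by an explicit loop that collects the (u, check(u)) splits and a
-- reverse fold, and replaces A's quadratic prefix-count split by a single running-difference pass.
-- Equivalence is about the RETURN value; neither version mutates its argument.

-- ===== PORT A =====
-- check_string, shared verbatim by both Pythons (loop with early return → structural recursion on the chars)
def pyCheck (check : Int) (l : List Char) : Bool :=
  match l with
  | [] => true
  | ch :: t =>
    let c := if ch = '(' then check + 1 else check - 1
    if c < 0 then false else pyCheck c t

-- u[1:-1].replace("(", "0").replace(")", "(").replace("0", ")") — three single-char replaces,
-- identical text in both Pythons; each replace is a charwise map (exact for 1-char patterns)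
def pyRep (a b : Char) (l : List Char) : List Char := l.map (fun c => if c = a then b else c)
def pySwap (l : List Char) : List Char := pyRep '0' ')' (pyRep ')' '(' (pyRep '(' '0' l))

-- A's balanced_string: loop i = 1 .. len(s), test s[:i].count("(") == s[:i].count(")"); no hit → ([],[]) ≈ ("","")
def balancedA (s : List Char) (i : Nat) : List Char × List Char :=
  if i ≤ s.length then
    let sample := s.take i
    if sample.count '(' = sample.count ')' then (s.take i, s.drop i)
    else balancedA s (i + 1)
  else ([], [])
termination_by s.length + 1 - i
decreasing_by omega

-- A's solution, with a fuel guard (fuel = |p| + 1 always suffices; fuel only makes the recursion structural)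
def solutionFuel : Nat → List Char → List Char
  | 0, _ => []
  | f + 1, p =>
    if pyCheck 0 p then p
    else
      let u := (balancedA p 1).1
      let v := (balancedA p 1).2
      if pyCheck 0 u then u ++ solutionFuel f v
      else '(' :: (solutionFuel f v ++ ')' :: pySwap ((u.drop 1).dropLast))

def solution (p : String) : String := String.mk (solutionFuel (p.toList.length + 1) p.toList)

-- ===== PORT B =====
-- B's balanced_string: ONE pass keeping the running difference d, split at the first position where d = 0
def balBGo (s : List Char) (d : Int) (i : Nat) (rest : List Char) : List Char × List Char :=
  match rest with
  | [] => ([], [])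
  | ch :: t =>
    let d' := if ch = '(' then d + 1 else if ch = ')' then d - 1 else d
    if d' = 0 then (s.take (i + 1), s.drop (i + 1)) else balBGo s d' (i + 1) t

def balancedB (s : List Char) : List Char × List Char := balBGo s 0 0 s

-- B's while-loop: peel splits off p, pushing (u, check(u)); stops when check(p) holds (fuel as above)
def altLoop : Nat → List Char → List (List Char × Bool) → List Char × List (List Char × Bool)
  | 0, p, steps => (p, steps)
  | f + 1, p, steps =>
    if pyCheck 0 p then (p, steps)
    else
      let uv := balancedB p
      altLoop f uv.2 (steps ++ [(uv.1, pyCheck 0 uv.1)])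

-- body of B's 'for u, ok in reversed(steps)' loop
def stepFn (r : List Char) (s : List Char × Bool) : List Char :=
  if s.2 then s.1 ++ r else '(' :: (r ++ ')' :: pySwap ((s.1.drop 1).dropLast))

def solution_alt (p : String) : String :=
  String.mk ((altLoop (p.toList.length + 1) p.toList []).2.reverse.foldl stepFn
    (altLoop (p.toList.length + 1) p.toList []).1)

-- ===== PRECONDITION & SPEC =====
-- helper for Pre_ only (independent of both ports): paren-count difference of a list
def pdiff (l : List Char) : Int := (l.count '(' : Int) - (l.count ')' : Int)

-- Pre_ excludes exactly the inputs on which A does not return a string: there, A's balanced_string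
-- falls through to ([], []) at some recursion level, so A raises TypeError (str + list) or returns
-- the empty LIST, not a value of the declared type.  A returns a string iff some prefix with equal
-- counts of '(' and ')' leaves a suffix every nonempty prefix of which is at least half '(' (that
-- is, a suffix check_string accepts).
def Pre_solution (p : String) : Prop :=
  ∃ k < p.toList.length + 1, pdiff (p.toList.take k) = 0 ∧
    ∀ j < (p.toList.drop k).length + 1, j ≤ 2 * ((p.toList.drop k).take j).count '('
instance (p : String) : Decidable (Pre_solution p) := by unfold Pre_solution; infer_instance

def pvWitness_solution : String := ")()("

def Spec_solution (p : String) (out : String) : Prop := out = solution_alt p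
instance (p : String) (out : String) : Decidable (Spec_solution p out) := by unfold Spec_solution; infer_instance

-- ===== CLAIM (what is proved, stated in full; the proofs are below) =====
def Claim_equal_solution : Prop := ∀ (p : String), Dom_solution p → Pre_solution p → Spec_solution p (solution p)

-- ===== LEMMAS AND PROOFS =====

theorem pyCheck_false_ne_nil {p : List Char} (h : pyCheck 0 p = false) : p ≠ [] := by
  intro hp; subst hp; simp [pyCheck] at h

theorem pdiff_append_singleton (l : List Char) (c : Char) :
    pdiff (l ++ [c]) = pdiff l + (if c = '(' then 1 else if c = ')' then -1 else 0) := by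
  unfold pdiff
  by_cases h1 : c = '(' <;> by_cases h2 : c = ')' <;>
    simp [h1, h2, List.count_append] <;> omega

theorem balBGo_eq_balancedA (s : List Char) :
    ∀ (rest : List Char) (i : Nat), s.drop i = rest →
      balBGo s (pdiff (s.take i)) i rest = balancedA s (i + 1) := by
  intro rest
  induction rest with
  | nil =>
    intro i hdrop
    have hlen : s.length ≤ i := by
      by_contra hlt
      push_neg at hlt
      have := List.drop_eq_nil_iff.mp hdrop
      omega
    rw [balancedA]
    simp [balBGo, Nat.not_le.mpr (by omega : s.length < i + 1)]
  | cons ch t ih =>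
    intro i hdrop
    have hi : i < s.length := by
      by_contra hge
      push_neg at hge
      rw [List.drop_eq_nil_iff.mpr hge] at hdrop
      simp at hdrop
    have hget : s[i]? = some ch := by
      have h0 : (s.drop i)[0]? = some ch := by rw [hdrop]; rfl
      rw [List.getElem?_drop] at h0
      simpa using h0
    have htake : s.take (i + 1) = s.take i ++ [ch] := by
      rw [List.take_add_one, hget]
      rfl
    have hdrop' : s.drop (i + 1) = t := by
      have : s.drop (i + 1) = (s.drop i).drop 1 := by
        rw [List.drop_drop]
      rw [this, hdrop]
      simp
    have hd' : (if ch = '(' then pdiff (s.take i) + 1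
                else if ch = ')' then pdiff (s.take i) - 1 else pdiff (s.take i))
        = pdiff (s.take (i + 1)) := by
      rw [htake, pdiff_append_singleton]
      by_cases h1 : ch = '(' <;> by_cases h2 : ch = ')' <;> simp [h1, h2] <;> try omega
    have hcond : (pdiff (s.take (i + 1)) = 0) ↔
        ((s.take (i + 1)).count '(' = (s.take (i + 1)).count ')') := by
      unfold pdiff; omega
    rw [balancedA]
    have hle : i + 1 ≤ s.length := by omega
    simp only [hle, if_pos]
    by_cases hz : pdiff (s.take (i + 1)) = 0
    · have hcnt : (s.take (i + 1)).count '(' = (s.take (i + 1)).count ')' := hcond.mp hz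
      simp [balBGo, hd', hz, hcnt]
    · have hcnt : ¬ ((s.take (i + 1)).count '(' = (s.take (i + 1)).count ')') := fun h => hz (hcond.mpr h)
      simp only [balBGo, hd', if_neg hz, hcnt, if_neg, ite_false]
      exact ih (i + 1) hdrop'

theorem balancedB_eq_balancedA (s : List Char) : balancedB s = balancedA s 1 := by
  have := balBGo_eq_balancedA s s 0 (by simp)
  simpa [balancedB, pdiff] using this

theorem balBGo_snd_lt (s : List Char) (hs : s ≠ []) :
    ∀ (rest : List Char) (d : Int) (i : Nat), (balBGo s d i rest).2.length < s.length := by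
  intro rest
  induction rest with
  | nil =>
    intro d i
    have : 0 < s.length := List.length_pos_iff.mpr hs
    simpa [balBGo] using this
  | cons ch t ih =>
    intro d i
    simp only [balBGo]
    by_cases hz : (if ch = '(' then d + 1 else if ch = ')' then d - 1 else d) = 0
    · have : 0 < s.length := List.length_pos_iff.mpr hs
      simp only [if_pos hz, List.length_drop]
      omega
    · simp only [if_neg hz]
      exact ih _ _

theorem balancedA_snd_lt (s : List Char) (hs : s ≠ []) :
    (balancedA s 1).2.length < s.length := by
  rw [← balancedB_eq_balancedA]
  exact balBGo_snd_lt s hs s 0 0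

-- main invariant: running B's loop then its reverse fold computes A's recursion
theorem main_invariant :
    ∀ (f : Nat) (p : List Char) (steps : List (List Char × Bool)), p.length < f →
      ((altLoop f p steps).2.reverse.foldl stepFn (altLoop f p steps).1)
        = steps.reverse.foldl stepFn (solutionFuel f p) := by
  intro f
  induction f with
  | zero => intro p steps h; omega
  | succ f ih =>
    intro p steps hlen
    by_cases hc : pyCheck 0 p = true
    · simp [altLoop, solutionFuel, hc]
    · have hcf : pyCheck 0 p = false := by simpa using hc
      have hne : p ≠ [] := pyCheck_false_ne_nil hcf
      have hv : (balancedA p 1).2.length < p.length := balancedA_snd_lt p hne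
      simp only [altLoop, solutionFuel, hcf, Bool.false_eq_true, if_false,
        balancedB_eq_balancedA]
      rw [ih (balancedA p 1).2 (steps ++ [((balancedA p 1).1, pyCheck 0 (balancedA p 1).1)])
        (by omega)]
      rw [List.reverse_append]
      simp only [List.reverse_singleton, List.singleton_append, List.foldl_cons]
      have hstep : stepFn (solutionFuel f (balancedA p 1).2) ((balancedA p 1).1, pyCheck 0 (balancedA p 1).1)
          = (if pyCheck 0 (balancedA p 1).1 = true then (balancedA p 1).1 ++ solutionFuel f (balancedA p 1).2
             else '(' :: (solutionFuel f (balancedA p 1).2 ++ ')' :: pySwap (List.drop 1 (balancedA p 1).1).dropLast)) := by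
        unfold stepFn
        by_cases hu : pyCheck 0 (balancedA p 1).1 = true <;> simp [hu]
      rw [hstep]

theorem solution_eq_alt (p : String) : solution p = solution_alt p := by
  unfold solution solution_alt
  have := main_invariant (p.toList.length + 1) p.toList [] (by omega)
  simp only [List.reverse_nil, List.foldl_nil] at this
  rw [this]

-- ===== VERDICT (by name: the statement is the Claim_ definition above) =====
theorem solution_spec : Claim_equal_solution := by
  intro p _ _
  unfold Spec_solution
  exact solution_eq_alt p
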